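-- pv_equiv track=rewrite | github.com/KonradMarzec1991/Codewars-LeetCode | Python/6kyu/6kyu_English beggars.py | beggars
-- ===== SOURCE A (Python) =====
-- def beggars(values, n):
--     from queue import Queue
--     if n == 0:
--         return []
--     q = Queue(maxsize=len(values))
--     for val in values:
--         q.put(val)
--     output_list = [0]*n
--     index = 0
--     while not q.empty():
--         output_list[index] += q.get()
--         index += 1
--         if index > len(output_list) - 1:
--             index = 0
--     return output_list
-- ===== SOURCE B (Python) =====
-- def beggars(values, n):
--     # Per-beggar gather: beggar i receives exactly the strided slice values[i::n].
--     return [sum(values[i::n]) for i in range(n)]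
-- ===== Notes on version B (the rewrite author's own statement) =====
-- stated objective: simpler
-- what changed: A scatters each value into a rotating output index driven by a thread-safe Queue and an explicit wrap-around counter; B gathers each beggar's total directly as sum(values[i::n]) in a one-line comprehension, with no queue, no mutable output list and no index bookkeeping.
-- crash fix: On n < 0 with non-empty values A raises IndexError ([0]*n is empty, so output_list[0] += ... fails); B returns [] since range(n) is empty. — e.g. on beggars([1, 2], -1): A raises IndexError, B returns []
import Mathlib
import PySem

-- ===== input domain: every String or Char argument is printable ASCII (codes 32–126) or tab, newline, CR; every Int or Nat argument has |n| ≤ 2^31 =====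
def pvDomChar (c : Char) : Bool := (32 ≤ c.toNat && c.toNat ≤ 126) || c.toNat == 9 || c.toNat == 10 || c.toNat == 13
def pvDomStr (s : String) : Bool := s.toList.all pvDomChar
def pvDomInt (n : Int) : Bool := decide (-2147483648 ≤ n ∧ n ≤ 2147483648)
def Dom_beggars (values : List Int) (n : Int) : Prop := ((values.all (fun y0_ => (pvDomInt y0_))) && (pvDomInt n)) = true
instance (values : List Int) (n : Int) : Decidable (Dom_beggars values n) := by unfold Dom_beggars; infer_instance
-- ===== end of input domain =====

-- B replaces A's forward scatter (queue + rotating output index) by a per-beggar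
-- gather: output[i] is the sum of the strided slice values[i::n]. Objective: simpler.

-- ===== PORT A =====
-- the while loop over the queue: state = (output_list, index); q.get pops the front
def beggarsLoop (q : List Int) (out : List Int) (index : Int) : List Int :=
  match q with
  | [] => out
  | v :: t =>
    -- output_list[index] += q.get()  (index is always a valid non-negative index on Pre_)
    let out' := out.set index.toNat (out.getD index.toNat 0 + v)
    let i1 := index + 1
    let i2 := if i1 > (out'.length : Int) - 1 then 0 else i1
    beggarsLoop t out' i2

def beggars (values : List Int) (n : Int) : List Int :=
  if n = 0 then []
  else beggarsLoop values (List.replicate n.toNat 0) 0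

-- ===== PORT B =====
def beggars_alt (values : List Int) (n : Int) : List Int :=
  (PySem.List.pyRange 0 n 1).map
    (fun i => ((PySem.List.slice? values (some i) none n).getD []).sum)

-- ===== PRECONDITION & SPEC =====
-- Pre_ excludes only inputs where A raises IndexError: n < 0 with non-empty values
-- ([0]*n is [] for n < 0, so the first output_list[0] += … fails).
def Pre_beggars (values : List Int) (n : Int) : Prop := 0 ≤ n ∨ values = []
instance (values : List Int) (n : Int) : Decidable (Pre_beggars values n) := by unfold Pre_beggars; infer_instance
def pvWitness_beggars : List Int × Int := ([5, 3, 7, 2], 3)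

-- On n < 0 with non-empty values A raises IndexError; B naturally returns [] (range(n) is empty).
def Raises_beggars (values : List Int) (n : Int) : Prop := n < 0 ∧ values ≠ []
instance (values : List Int) (n : Int) : Decidable (Raises_beggars values n) := by unfold Raises_beggars; infer_instance
def pvRaiseWitness_beggars : List Int × Int := ([1, 2], -1)
def pvRaiseWitnessOut_beggars : List Int := []

def Spec_beggars (values : List Int) (n : Int) (out : List Int) : Prop := out = beggars_alt values n
instance (values : List Int) (n : Int) (out : List Int) : Decidable (Spec_beggars values n out) := by unfold Spec_beggars; infer_instance

-- ===== CLAIM (what is proved, stated in full; the proofs are below) =====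
def Claim_equal_beggars : Prop := ∀ (values : List Int) (n : Int), Dom_beggars values n → Pre_beggars values n → Spec_beggars values n (beggars values n)
def Claim_raises_beggars : Prop := (∀ (values : List Int) (n : Int), Dom_beggars values n → Raises_beggars values n → ¬ Pre_beggars values n) ∧ (Dom_beggars (pvRaiseWitness_beggars.1) (pvRaiseWitness_beggars.2) ∧ Raises_beggars (pvRaiseWitness_beggars.1) (pvRaiseWitness_beggars.2) ∧ beggars_alt (pvRaiseWitness_beggars.1) (pvRaiseWitness_beggars.2) = pvRaiseWitnessOut_beggars)

-- ===== LEMMAS AND PROOFS =====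

-- the strided sublist values[j], values[j+m+1], values[j+2(m+1)], … (m = step - 1)
def strided : List Int → Nat → Nat → List Int
  | [], _, _ => []
  | v :: t, 0, m => v :: strided t m m
  | _ :: t, j+1, m => strided t j m

theorem slice_nil (n : Int) (hn : 0 < n) (j : Int) :
    PySem.List.slice? ([] : List Int) (some j) none n = some [] := by
  simp [PySem.List.slice?, PySem.List.sliceIndices]
  omega

theorem slice_shift (v : Int) (t : List Int) (j st : Int) (hj : 0 ≤ j) (hst : 0 < st) :
    PySem.List.slice? (v :: t) (some (j+1)) none st = PySem.List.slice? t (some j) none st := by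
  have h1 : ¬ st < 0 := by omega
  have h2 : ¬ st = 0 := by omega
  have h3 : ¬ j + 1 < 0 := by omega
  have h4 : ¬ j < 0 := by omega
  simp only [PySem.List.slice?, PySem.List.sliceIndices, h1, h2, h3, h4, hst,
    if_false, if_pos, List.length_cons]
  congr 1
  push_cast
  rw [show min (j+1) ((t.length:Int)+1) = min j (t.length:Int) + 1 by omega]
  rw [show ((t.length:Int) + 1 - (min j (t.length:Int) + 1)) = ((t.length:Int) - min j (t.length:Int)) by ring]
  by_cases hc : min j (t.length:Int) < (t.length:Int)
  · simp only [if_pos hc, if_pos (show min j (t.length:Int) + 1 < (t.length:Int) + 1 from by omega)]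
    apply List.filterMap_congr
    intro x hx
    have hx0 : (0:Int) ≤ st * (x:Int) := mul_nonneg (by omega) (Int.natCast_nonneg x)
    rw [show (min j (t.length:Int) + 1 + st * (x:Int)).toNat = (min j (t.length:Int) + st * (x:Int)).toNat + 1 by omega]
    simp
  · simp only [if_neg hc, if_neg (show ¬ min j (t.length:Int) + 1 < (t.length:Int) + 1 from by omega)]
    simp

theorem slice_head (v : Int) (t : List Int) (st : Int) (hst : 0 < st) :
    PySem.List.slice? (v :: t) (some 0) none st =
      (PySem.List.slice? t (some (st-1)) none st).map (fun l => v :: l) := by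
  have h1 : ¬ st < 0 := by omega
  have h2 : ¬ st = 0 := by omega
  have h4 : ¬ st - 1 < 0 := by omega
  simp only [PySem.List.slice?, PySem.List.sliceIndices, h1, h2, h4, hst,
    if_false, if_pos, List.length_cons, Option.map_some]
  congr 1
  push_cast
  rw [show min (0:Int) ((t.length:Int)+1) = 0 by omega,
      if_pos (show (0:Int) < (t.length:Int) + 1 by omega),
      show ((t.length:Int) + 1 - 0 + st - 1) = (t.length:Int) + 1*st by ring,
      Int.add_mul_ediv_right _ _ h2]
  have hm2 : (if min (st - 1) (t.length:Int) < (t.length:Int) then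
      (((t.length:Int) - min (st - 1) (t.length:Int) + st - 1) / st).toNat else 0)
      = ((t.length:Int)/st).toNat := by
    by_cases hcase : st - 1 < (t.length:Int)
    · rw [if_pos (by omega)]
      congr 1
      rw [show min (st-1) (t.length:Int) = st - 1 by omega]
      congr 1
      ring
    · rw [if_neg (by omega)]
      have : (t.length:Int) / st = 0 := by
        apply Int.ediv_eq_zero_of_lt <;> omega
      omega
  rw [hm2]
  have hcn : ((t.length:Int)/st + 1).toNat = ((t.length:Int)/st).toNat + 1 := by
    have : 0 ≤ (t.length:Int)/st := Int.ediv_nonneg (by omega) (by omega)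
    omega
  rw [hcn, List.range_succ_eq_map, List.filterMap_cons, List.filterMap_map]
  norm_num
  by_cases hcase : st - 1 < (t.length:Int)
  · apply List.filterMap_congr
    intro x hx
    have hx0 : (0:Int) ≤ st * (x:Int) := mul_nonneg (by omega) (Int.natCast_nonneg x)
    have h5 : st * ((x:Int)+1) = st * (x:Int) + st := by ring
    rw [show min (st-1) (t.length:Int) = st - 1 by omega]
    rw [show (st * ((x:Int)+1)).toNat = (st - 1 + st * (x:Int)).toNat + 1 by omega]
    simp
  · have : (t.length:Int) / st = 0 := by
      apply Int.ediv_eq_zero_of_lt <;> omega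
    rw [this]
    simp

theorem slice_strided (vs : List Int) (j n : Nat) (hn : 0 < n) :
    PySem.List.slice? vs (some (j:Int)) none (n:Int) = some (strided vs j (n-1)) := by
  induction vs generalizing j with
  | nil => rw [slice_nil _ (by exact_mod_cast hn)]; rfl
  | cons v t ih =>
    cases j with
    | zero =>
      rw [show ((0:Nat):Int) = (0:Int) by rfl,
          slice_head v t (n:Int) (by exact_mod_cast hn),
          show ((n:Int) - 1) = (((n-1 : Nat)):Int) by omega,
          ih (n-1)]
      rfl
    | succ j' =>
      rw [show ((j'+1 : Nat):Int) = ((j':Int) + 1) by push_cast; ring,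
          slice_shift v t (j':Int) (n:Int) (Int.natCast_nonneg j') (by exact_mod_cast hn),
          ih j']
      rfl

theorem beggarsLoop_length (q : List Int) (out : List Int) (i : Int) :
    (beggarsLoop q out i).length = out.length := by
  induction q generalizing out i with
  | nil => rfl
  | cons v t ih => simp [beggarsLoop, ih]

-- offset from the running index i to beggar j, around the cycle of length n
def offIx (i j n : Nat) : Nat := if i ≤ j then j - i else n + j - i

theorem beggarsLoop_getD (q : List Int) (out : List Int) (i j : Nat)
    (hi : i < out.length) (hj : j < out.length) :
    (beggarsLoop q out (i:Int)).getD j 0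
      = out.getD j 0 + (strided q (offIx i j out.length) (out.length - 1)).sum := by
  induction q generalizing out i with
  | nil => simp [beggarsLoop, strided]
  | cons v t ih =>
    simp only [beggarsLoop, Int.toNat_natCast]
    set out' := out.set i (out.getD i 0 + v) with hout'
    have hlen' : out'.length = out.length := by simp [hout']
    have hcond : ((i:Int) + 1 > (out'.length : Int) - 1) ↔ (i + 1 = out.length) := by
      rw [hlen']; omega
    have hou : out'.getD j 0 = out.getD j 0 + (if i = j then v else 0) := by
      by_cases h : i = j
      · subst h
        simp [hout', List.getD_eq_getElem?_getD, hj]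
      · simp [hout', List.getD_eq_getElem?_getD, h]
    by_cases hwrap : i + 1 = out.length
    · rw [if_pos (hcond.mpr hwrap)]
      have hrec := ih out' 0 (by omega) (by omega)
      rw [Nat.cast_zero] at hrec
      rw [hrec, hou, hlen']
      by_cases h : i = j
      · subst h
        have h1 : offIx i i out.length = 0 := by unfold offIx; split_ifs <;> omega
        have h2 : offIx 0 i out.length = out.length - 1 := by
          unfold offIx; split_ifs <;> omega
        rw [h1, h2]
        simp [strided]
        ring
      · have hji : j < i := by omega
        have h1 : offIx i j out.length = j + 1 := by unfold offIx; split_ifs <;> omega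
        have h2 : offIx 0 j out.length = j := by unfold offIx; split_ifs <;> omega
        rw [h1, h2]
        simp [strided, h]
    · rw [if_neg (fun hc => hwrap (hcond.mp hc))]
      have hrec := ih out' (i+1) (by omega) (by omega)
      rw [show (((i+1 : Nat)):Int) = ((i:Int) + 1) by push_cast; ring] at hrec
      rw [hrec, hou, hlen']
      by_cases h : i = j
      · subst h
        have h1 : offIx i i out.length = 0 := by unfold offIx; split_ifs <;> omega
        have h2 : offIx (i+1) i out.length = out.length - 1 := by
          unfold offIx; split_ifs <;> omega
        rw [h1, h2]
        simp [strided]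
        ring
      · by_cases hij : i < j
        · have h1 : offIx i j out.length = (j - i - 1) + 1 := by
            unfold offIx; split_ifs <;> omega
          have h2 : offIx (i+1) j out.length = j - i - 1 := by
            unfold offIx; split_ifs <;> omega
          rw [h1, h2]
          simp [strided, h]
        · have h1 : offIx i j out.length = (out.length + j - i - 1) + 1 := by
            unfold offIx; split_ifs <;> omega
          have h2 : offIx (i+1) j out.length = out.length + j - i - 1 := by
            unfold offIx; split_ifs <;> omega
          rw [h1, h2]
          simp [strided, h]

theorem main_equal (values : List Int) (n : Int) (hpre : Pre_beggars values n) :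
    beggars values n = beggars_alt values n := by
  by_cases hn0 : n = 0
  · subst hn0
    simp [beggars, beggars_alt, PySem.List.pyRange_one_eq_nil (le_refl (0:Int))]
  · by_cases hneg : n < 0
    · have hv : values = [] := by
        rcases hpre with h | h
        · omega
        · exact h
      subst hv
      have : n.toNat = 0 := by omega
      simp [beggars, beggars_alt, hn0, this, beggarsLoop,
        PySem.List.pyRange_one_eq_nil (by omega : n ≤ 0)]
    · have hpos : 0 < n := by omega
      have hposn : 0 < n.toNat := by omega
      rw [beggars, if_neg hn0, beggars_alt]
      apply List.ext_getElem
      · rw [beggarsLoop_length, List.length_replicate, List.length_map,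
          PySem.List.length_pyRange_one]
        omega
      · intro j h1 h2
        have hjlt : j < n.toNat := by
          have := h1
          rwa [beggarsLoop_length, List.length_replicate] at this
        have hlenr : (List.replicate n.toNat (0:Int)).length = n.toNat := List.length_replicate
        -- A side
        have hA : (beggarsLoop values (List.replicate n.toNat 0) 0)[j]
            = (strided values j (n.toNat - 1)).sum := by
          have hrec := beggarsLoop_getD values (List.replicate n.toNat 0) 0 j
            (by omega) (by omega)
          rw [Nat.cast_zero] at hrec
          rw [← List.getD_eq_getElem _ 0 h1, hrec]
          have hoff : offIx 0 j (List.replicate n.toNat (0:Int)).length = j := by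
            unfold offIx; split_ifs <;> omega
          rw [hoff, hlenr]
          simp [List.getD_eq_getElem?_getD, hjlt]
        -- B side
        have hB : ((PySem.List.pyRange 0 n 1).map
              (fun i => ((PySem.List.slice? values (some i) none n).getD []).sum))[j]
            = (strided values j (n.toNat - 1)).sum := by
          rw [List.getElem_map]
          have hidx : (PySem.List.pyRange 0 n 1)[j]'(by
              rwa [List.length_map] at h2) = ((j:Nat):Int) := by
            rw [PySem.List.getElem_pyRange_one]
            omega
          rw [hidx, show (n:Int) = ((n.toNat : Nat):Int) by omega,
              slice_strided values j n.toNat hposn]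
          rfl
        rw [hA, hB]

-- ===== VERDICT (by name: the statement is the Claim_ definition above) =====
theorem beggars_spec : Claim_equal_beggars := by
  intro values n _ hpre
  unfold Spec_beggars
  exact main_equal values n hpre

@[simp] theorem beggars_raises : Claim_raises_beggars := by
  unfold Claim_raises_beggars
  constructor
  · intro values n _ hr hpre
    unfold Raises_beggars at hr
    unfold Pre_beggars at hpre
    rcases hpre with h | h
    · omega
    · exact hr.2 h
  · exact ⟨by decide, by decide, by decide⟩
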